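-- pv_equiv track=rewrite | github.com/kristjanr/harjutusi | variant1/yl5.py | liblikas
-- ===== SOURCE A (Python) =====
-- def liblikas(string):
--     try:
--         words = string.split()
--     except AttributeError:
--         return None
--     have_replaced = False
--     new_sentence = []
--     for word in reversed(words):
--         if not have_replaced and word[0].lower() == 'a':
--             new_sentence.append('liblikas')
--             have_replaced = True
--             continue
--         new_sentence.append(word)
--     return ' '.join(reversed(new_sentence))
-- ===== SOURCE B (Python) =====
-- def liblikas(string):
--     try:
--         words = string.split()
--     except AttributeError:
--         return None
--     last_idx = -1
--     for i, word in enumerate(words):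
--         if word[0].lower() == 'a':
--             last_idx = i
--     if last_idx != -1:
--         words[last_idx] = 'liblikas'
--     return ' '.join(words)
-- ===== Notes on version B (the rewrite author's own statement) =====
-- stated objective: simpler
-- what changed: Replaces the reverse scan with a have_replaced flag and a freshly accumulated list by a forward pass that records the index of the last matching word, then one in-place assignment before joining the original list.
import Mathlib
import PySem

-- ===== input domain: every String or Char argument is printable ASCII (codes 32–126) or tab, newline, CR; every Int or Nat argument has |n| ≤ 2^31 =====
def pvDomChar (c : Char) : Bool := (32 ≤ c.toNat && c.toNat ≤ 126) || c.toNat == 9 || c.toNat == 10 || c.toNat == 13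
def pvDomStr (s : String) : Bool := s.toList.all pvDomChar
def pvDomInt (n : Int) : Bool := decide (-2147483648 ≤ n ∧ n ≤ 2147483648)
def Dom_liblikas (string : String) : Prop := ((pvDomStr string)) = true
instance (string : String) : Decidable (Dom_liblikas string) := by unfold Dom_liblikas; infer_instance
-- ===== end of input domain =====

-- B replaces A's reverse scan + have_replaced flag + accumulated new list by a forward pass that
-- records the last matching word's index and a single in-place assignment; return values proved equal.

-- ===== PORT A =====
-- shared helper: word[0].lower() == 'a' (words from split() are nonempty, so the none branch is unreachable)
def pvStartsA (w : String) : Bool :=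
  match PySem.Str.pyGet? w 0 with
  | some c => PySem.Chars.lower [c] == ['a']
  | none => false

-- the for-loop over reversed(words) with the have_replaced flag, producing new_sentence in append order
def pvLoopA : Bool → List String → List String
  | _, [] => []
  | flag, w :: ws =>
    if !flag && pvStartsA w then "liblikas" :: pvLoopA true ws
    else w :: pvLoopA flag ws

def liblikas (string : String) : Option String :=
  -- string.split() cannot raise AttributeError on a str, so the except branch is dead here
  let words := PySem.Str.split₀ string
  some (PySem.Str.join " " (pvLoopA false words.reverse).reverse)

-- ===== PORT B =====
-- forward pass: last_idx after enumerate-loop (i = current index, best = last_idx so far)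
def pvFindLast : Int → Int → List String → Int
  | _, best, [] => best
  | i, best, w :: ws => pvFindLast (i + 1) (if pvStartsA w then i else best) ws

def liblikas_alt (string : String) : Option String :=
  let words := PySem.Str.split₀ string
  let lastIdx := pvFindLast 0 (-1) words
  if lastIdx == -1 then some (PySem.Str.join " " words)
  else some (PySem.Str.join " " (words.set lastIdx.toNat "liblikas"))

-- ===== PRECONDITION & SPEC =====
def Spec_liblikas (string : String) (out : Option String) : Prop := out = liblikas_alt string
instance (string : String) (out : Option String) : Decidable (Spec_liblikas string out) := by unfold Spec_liblikas; infer_instance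

-- ===== CLAIM (what is proved, stated in full; the proofs are below) =====
def Claim_equal_liblikas : Prop := ∀ (string : String), Dom_liblikas string → Spec_liblikas string (liblikas string)

-- ===== LEMMAS AND PROOFS =====

-- index of the LAST word satisfying pvStartsA (meaningful when ws.any pvStartsA)
def pvLastAt : List String → Nat
  | [] => 0
  | _ :: t => if t.any pvStartsA then pvLastAt t + 1 else 0

theorem pvFindLast_eq (t : List String) : ∀ (i best : Int),
    pvFindLast i best t = if t.any pvStartsA then i + (pvLastAt t : Int) else best := by
  induction t with
  | nil => intro i best; simp [pvFindLast]
  | cons w t ih =>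
    intro i best
    simp only [pvFindLast, ih, List.any_cons, pvLastAt]
    by_cases hw : pvStartsA w <;> by_cases ht : t.any pvStartsA <;>
      simp [hw, ht] <;> ring_nf

theorem pvLoopA_true (ws : List String) : pvLoopA true ws = ws := by
  induction ws with
  | nil => rfl
  | cons w t ih => simp [pvLoopA, ih]

theorem pvLoopA_append (xs ys : List String) :
    pvLoopA false (xs ++ ys) =
      if xs.any pvStartsA then pvLoopA false xs ++ ys else xs ++ pvLoopA false ys := by
  induction xs with
  | nil => simp
  | cons w t ih =>
    by_cases hw : pvStartsA w
    · simp [pvLoopA, hw, pvLoopA_true]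
    · simp only [List.cons_append, pvLoopA, hw, Bool.not_false, Bool.and_false, ih,
        List.any_cons, Bool.false_or]
      by_cases ht : t.any pvStartsA <;> simp [ht]

theorem pvLoop_eq_set (ws : List String) :
    (pvLoopA false ws.reverse).reverse =
      if ws.any pvStartsA then ws.set (pvLastAt ws) "liblikas" else ws := by
  induction ws with
  | nil => rfl
  | cons w t ih =>
    have hrev : (w :: t).reverse = t.reverse ++ [w] := by simp
    rw [hrev, pvLoopA_append]
    by_cases ht : t.any pvStartsA
    · have ht' : t.reverse.any pvStartsA = true := by simp [ht]
      simp [ht', ih, ht, pvLastAt]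
    · have ht' : t.reverse.any pvStartsA = false := by simp [ht]
      simp only [ht', Bool.false_eq_true, if_false]
      by_cases hw : pvStartsA w
      · simp [pvLoopA, hw, pvLastAt, ht]
      · simp [pvLoopA, hw, ht]

theorem pv_main (ws : List String) :
    PySem.Str.join " " (pvLoopA false ws.reverse).reverse =
      (if (pvFindLast 0 (-1) ws) == -1 then PySem.Str.join " " ws
       else PySem.Str.join " " (ws.set (pvFindLast 0 (-1) ws).toNat "liblikas")) := by
  rw [pvLoop_eq_set, pvFindLast_eq]
  by_cases h : ws.any pvStartsA
  · simp [h]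
  · simp [h]

-- ===== VERDICT (by name: the statement is the Claim_ definition above) =====
theorem liblikas_spec : Claim_equal_liblikas := by
  intro s _
  unfold Spec_liblikas liblikas liblikas_alt
  simp only [pv_main]
  split <;> rfl
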